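/- GENERATED by tools/mkcompositions.py from design/units.gif.tsv (unit `digest_extensions.COMPOSITION`) — do not edit.
   THE PROOF of the composition unit `digest_extensions.COMPOSITION`: the 3 segments of `digest_extensions` chain into its contract, by the theorem
   `Gif.Spec.digest_extensions.compose` (proved next to the cut assertions). -/
import Gif.Spec.Units.digest_extensions_COMPOSITION

/-- The segments of `digest_extensions` compose into its contract. -/
theorem Gif.Spec.Proved.digest_extensions_COMPOSITION_ok : Gif.Spec.digest_extensions_COMPOSITION.Statement := by
  intro Lay _hLay μ _hμ u₀ h_digest_extensions_1 h_digest_extensions_2 h_digest_extensions_E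
  apply Gif.Spec.digest_extensions.compose
  all_goals assumption
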